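-- pv_equiv track=rewrite | github.com/lueasf/DSA | 7_exam_algo/exam.py | nextLevelShrink
-- ===== SOURCE A (Python) =====
-- def nextLevelShrink(w):
--     L = []
--     for i in range(1,len(w)):
--         L.append(w[0:i-1]+w[i:])
--     for i in range(1,len(w)):
--         if w[0:i]+w[i+1:] not in L:
--             L.append(w[0:i]+w[i+1:])
--     return L
-- ===== SOURCE B (Python) =====
-- def nextLevelShrink(w):
--     n = len(w)
--     L = [w[:i] + w[i + 1:] for i in range(n - 1)]
--     if n >= 2:
--         last = w[:n - 1]
--         if last not in L:
--             L.append(last)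
--     return L
-- ===== Notes on version B (the rewrite author's own statement) =====
-- stated objective: alternative
-- what changed: Replaces A's two symmetric n-length loops (the second with a membership scan on every iteration) by a single comprehension building all single-char deletions at positions 0..n-2 plus one conditional append of the last-char deletion, the only element A's second loop can ever add.
import Mathlib
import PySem

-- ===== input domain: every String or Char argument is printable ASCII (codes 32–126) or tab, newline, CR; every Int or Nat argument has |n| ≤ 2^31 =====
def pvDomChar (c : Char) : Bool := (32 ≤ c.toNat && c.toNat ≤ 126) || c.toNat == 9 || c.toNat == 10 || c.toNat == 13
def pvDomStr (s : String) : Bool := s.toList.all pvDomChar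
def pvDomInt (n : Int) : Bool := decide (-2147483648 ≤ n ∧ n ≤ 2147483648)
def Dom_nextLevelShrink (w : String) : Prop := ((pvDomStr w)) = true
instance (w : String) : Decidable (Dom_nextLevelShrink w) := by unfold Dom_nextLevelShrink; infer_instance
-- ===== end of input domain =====

-- B replaces A's two n-length loops by one building pass plus one conditional append of the last-char deletion.

-- ===== PORT A =====
def nextLevelShrink (w : String) : List String :=
  let n : Int := PySem.Str.len w
  let L : List String := (PySem.List.pyRange 1 n 1).foldl
    (fun L i => L ++ [PySem.Str.slice w (some 0) (some (i - 1)) ++ PySem.Str.slice w (some i) none]) []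
  (PySem.List.pyRange 1 n 1).foldl
    (fun L i =>
      if PySem.Str.slice w (some 0) (some i) ++ PySem.Str.slice w (some (i + 1)) none ∈ L then L
      else L ++ [PySem.Str.slice w (some 0) (some i) ++ PySem.Str.slice w (some (i + 1)) none]) L

-- ===== PORT B =====
def nextLevelShrink_alt (w : String) : List String :=
  let n : Int := PySem.Str.len w
  let L : List String := (PySem.List.pyRange 0 (n - 1) 1).map
    (fun i => PySem.Str.slice w none (some i) ++ PySem.Str.slice w (some (i + 1)) none)
  if 2 ≤ n then
    let last := PySem.Str.slice w none (some (n - 1))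
    if last ∈ L then L else L ++ [last]
  else L

-- ===== PRECONDITION & SPEC =====
def Spec_nextLevelShrink (w : String) (out : List String) : Prop := out = nextLevelShrink_alt w
instance (w : String) (out : List String) : Decidable (Spec_nextLevelShrink w out) := by unfold Spec_nextLevelShrink; infer_instance

-- ===== CLAIM (what is proved, stated in full; the proofs are below) =====
def Claim_equal_nextLevelShrink : Prop := ∀ (w : String), Dom_nextLevelShrink w → Spec_nextLevelShrink w (nextLevelShrink w)

-- ===== LEMMAS AND PROOFS =====

-- a conditional-dedup fold over elements already present leaves the accumulator unchanged
lemma foldl_if_mem (s : Int → String) (r : List Int) (L0 : List String)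
    (h : ∀ i ∈ r, s i ∈ L0) :
    r.foldl (fun L i => if s i ∈ L then L else L ++ [s i]) L0 = L0 := by
  induction r with
  | nil => rfl
  | cons a t ih =>
    have ha : s a ∈ L0 := h a (List.mem_cons_self ..)
    simp only [List.foldl_cons, if_pos ha]
    exact ih (fun i hi => h i (List.mem_cons_of_mem _ hi))

-- w[0:b] = w[:b] on strings
lemma str_slice_zero (w : String) (b : Option Int) :
    PySem.Str.slice w (some 0) b = PySem.Str.slice w none b := by
  apply String.toList_inj.mp
  simp [PySem.Str.toList_slice]

-- w[n:] = "" when n = len(w)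
lemma str_slice_len (w : String) :
    PySem.Str.slice w (some (w.toList.length : Int)) none = "" := by
  apply String.toList_inj.mp
  simp [PySem.Str.toList_slice, PySem.List.slice_from_natCast]

theorem nextLevelShrink_eq (w : String) : nextLevelShrink w = nextLevelShrink_alt w := by
  unfold nextLevelShrink nextLevelShrink_alt
  simp only [PySem.Str.len_eq]
  set n : Int := (w.toList.length : Int) with hn
  have hL1 : ((PySem.List.pyRange 1 n 1).foldl
      (fun L i => L ++ [PySem.Str.slice w (some 0) (some (i - 1)) ++ PySem.Str.slice w (some i) none])
      ([] : List String)) =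
      (PySem.List.pyRange 1 n 1).map
        (fun i => PySem.Str.slice w (some 0) (some (i - 1)) ++ PySem.Str.slice w (some i) none) := by
    have h := PySem.List.foldl_append_singleton_eq_map
      (fun i : Int => PySem.Str.slice w (some 0) (some (i - 1)) ++ PySem.Str.slice w (some i) none)
      (PySem.List.pyRange 1 n 1) []
    rwa [List.nil_append] at h
  rw [hL1]
  -- the two first batches coincide
  have hbatch : (PySem.List.pyRange 1 n 1).map
        (fun i => PySem.Str.slice w (some 0) (some (i - 1)) ++ PySem.Str.slice w (some i) none) =
      (PySem.List.pyRange 0 (n - 1) 1).map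
        (fun i => PySem.Str.slice w none (some i) ++ PySem.Str.slice w (some (i + 1)) none) := by
    rw [PySem.List.pyRange_one 1 n, PySem.List.pyRange_one 0 (n - 1), List.map_map, List.map_map]
    have hlen : (n - 1).toNat = (n - 1 - 0).toNat := by omega
    rw [← hlen]
    apply List.map_congr_left
    intro k _
    simp only [Function.comp]
    rw [str_slice_zero]
    have e1 : (1 : Int) + (k : Int) - 1 = 0 + (k : Int) := by ring
    have e2 : (1 : Int) + (k : Int) = 0 + (k : Int) + 1 := by ring
    rw [e1, e2]
  set L : List String := (PySem.List.pyRange 0 (n - 1) 1).map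
      (fun i => PySem.Str.slice w none (some i) ++ PySem.Str.slice w (some (i + 1)) none) with hL
  rw [hbatch]
  by_cases h2 : 2 ≤ n
  · -- split off the last index n-1 of the second loop
    have hsplit : PySem.List.pyRange 1 n 1 = PySem.List.pyRange 1 (n - 1) 1 ++ [n - 1] := by
      have : n = (n - 1) + 1 := by omega
      rw [this, PySem.List.pyRange_one_succ_right (by omega : (1 : Int) ≤ n - 1)]
      norm_num
    rw [hsplit, List.foldl_append]
    have hid : (PySem.List.pyRange 1 (n - 1) 1).foldl
        (fun L i =>
          if PySem.Str.slice w (some 0) (some i) ++ PySem.Str.slice w (some (i + 1)) none ∈ L then L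
          else L ++ [PySem.Str.slice w (some 0) (some i) ++ PySem.Str.slice w (some (i + 1)) none]) L = L := by
      apply foldl_if_mem
      intro i hi
      rw [PySem.List.mem_pyRange_one] at hi
      rw [hL]
      apply List.mem_map.mpr
      refine ⟨i, ?_, ?_⟩
      · rw [PySem.List.mem_pyRange_one]; omega
      · rw [str_slice_zero]
    rw [hid]
    have hlast : PySem.Str.slice w (some 0) (some (n - 1)) ++
        PySem.Str.slice w (some ((n - 1) + 1)) none = PySem.Str.slice w none (some (n - 1)) := by
      have hne : (n - 1) + 1 = n := by omega
      rw [hne, str_slice_zero, hn, str_slice_len]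
      simp
    simp only [List.foldl_cons, List.foldl_nil]
    rw [hlast, if_pos h2]
  · -- n ≤ 1 : both loops are empty
    have h1 : PySem.List.pyRange 1 n 1 = [] := PySem.List.pyRange_one_eq_nil (by omega)
    have h0 : PySem.List.pyRange 0 (n - 1) 1 = [] := PySem.List.pyRange_one_eq_nil (by omega)
    rw [if_neg h2, hL, h1, h0]
    rfl

-- ===== VERDICT (by name: the statement is the Claim_ definition above) =====
theorem nextLevelShrink_spec : Claim_equal_nextLevelShrink := by
  intro w _
  exact nextLevelShrink_eq w
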